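-- pv_equiv track=rewrite | github.com/szymonsztuka/study | src/python/texit/hsvfcodec.py | parse_msg_with_spaces
-- ===== SOURCE A (Python) =====
-- def parse_msg_with_spaces(data):
--     fields = dict()
--     elems = data.split()
--     prec = ()
--     for e in elems:
--         pair = e.split("=")
--         if len(pair) == 2:
--             if len(prec) > 0:
--                 fields[prec[0]]=prec[1]
--             prec = pair
--         else:
--             prec[1] = prec[1] + " " + pair[0]
--     if len(prec) > 0:
--         fields[prec[0]] = prec[1]
--     return fields
-- ===== SOURCE B (Python) =====
-- def parse_msg_with_spaces(data):
--     tokens = data.split()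
--     fields = {}
--     i, n = 0, len(tokens)
--     while i < n:
--         key, val = tokens[i].split("=")
--         i += 1
--         parts = [val]
--         while i < n and tokens[i].count("=") != 1:
--             parts.append(tokens[i].split("=")[0])
--             i += 1
--         fields[key] = " ".join(parts)
--     return fields
-- ===== Notes on version B (the rewrite author's own statement) =====
-- stated objective: alternative
-- what changed: A does one pass carrying an open (key, value-so-far) pair that it flushes when the next key arrives; B instead uses a two-level loop that consumes each key-starting token together with its whole run of continuation tokens, collects the parts in a list and joins them once per field.
import Mathlib
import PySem

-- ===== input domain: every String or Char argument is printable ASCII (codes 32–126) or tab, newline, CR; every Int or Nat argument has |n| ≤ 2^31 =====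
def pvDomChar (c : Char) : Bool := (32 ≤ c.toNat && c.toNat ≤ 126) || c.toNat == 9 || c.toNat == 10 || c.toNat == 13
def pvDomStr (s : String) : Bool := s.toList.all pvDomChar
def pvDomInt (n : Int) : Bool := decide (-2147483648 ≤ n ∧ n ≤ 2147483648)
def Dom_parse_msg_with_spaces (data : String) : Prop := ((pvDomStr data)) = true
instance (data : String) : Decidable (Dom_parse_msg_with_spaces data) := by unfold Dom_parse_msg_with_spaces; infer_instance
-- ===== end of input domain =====

-- B replaces A's carried 'prec' pair (flushed on the next key) by an index-free two-level loop that
-- consumes each 'key=val' token together with its run of continuation tokens and joins them at the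
-- end; objective: alternative decomposition of the same O(n) scan.

-- ===== PORT A =====
def pvA_step (st : PySem.Dict String String × Option (String × String)) (e : String) :
    PySem.Dict String String × Option (String × String) :=
  let pair := (PySem.Str.split? e "=").getD []          -- e.split("="); sep nonempty, never none
  if pair.length = 2 then
    let fields := match st.2 with
      | some (k, v) => PySem.Dict.insert st.1 k v
      | none => st.1
    (fields, some (pair.headD "", pair.getD 1 ""))
  else
    match st.2 with
    | some (k, v) => (st.1, some (k, v ++ " " ++ pair.headD ""))
    | none => st   -- Python raises IndexError here (prec is the empty tuple); outside Pre_

def parse_msg_with_spaces (data : String) : List (String × String) :=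
  let st := (PySem.Str.split₀ data).foldl pvA_step (PySem.Dict.empty, none)
  (match st.2 with
   | some (k, v) => PySem.Dict.insert st.1 k v
   | none => st.1).items

-- ===== PORT B =====
-- inner while loop of Source B: collect the continuation parts and return them with the rest of tokens
def pvB_cont : List String → List String × List String
  | [] => ([], [])
  | t :: ts =>
    if PySem.Str.count t "=" ≠ 1 then
      (((PySem.Str.split? t "=").getD []).headD "" :: (pvB_cont ts).1, (pvB_cont ts).2)
    else ([], t :: ts)

lemma pvB_cont_len (ts : List String) : (pvB_cont ts).2.length ≤ ts.length := by
  induction ts with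
  | nil => simp [pvB_cont]
  | cons t ts ih =>
    simp only [pvB_cont]
    split_ifs with h
    · exact le_trans ih (Nat.le_succ _)
    · exact le_rfl

-- outer while loop of Source B
def pvB_main : List String → PySem.Dict String String → PySem.Dict String String
  | [], fields => fields
  | t :: ts, fields =>
    match (PySem.Str.split? t "=").getD [] with
    | [key, val] =>
        pvB_main (pvB_cont ts).2
          (PySem.Dict.insert fields key (PySem.Str.join " " (val :: (pvB_cont ts).1)))
    | _ => fields     -- Python: 'key, val = ...' raises ValueError here; outside Pre_
termination_by ts _ => ts.length
decreasing_by simpa using Nat.lt_succ_of_le (pvB_cont_len ts)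

def parse_msg_with_spaces_alt (data : String) : List (String × String) :=
  (pvB_main (PySem.Str.split₀ data) PySem.Dict.empty).items

-- ===== PRECONDITION & SPEC =====
-- Pre_ excludes exactly the inputs on which both Pythons raise (A: IndexError, B: ValueError):
-- a nonempty token list whose first token does not contain exactly one equals sign.
def Pre_parse_msg_with_spaces (data : String) : Prop :=
  PySem.Str.split₀ data = [] ∨ PySem.Str.count ((PySem.Str.split₀ data).headD "") "=" = 1
instance (data : String) : Decidable (Pre_parse_msg_with_spaces data) := by
  unfold Pre_parse_msg_with_spaces; infer_instance

def pvWitness_parse_msg_with_spaces : String := "a=1 b c=2"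

def Spec_parse_msg_with_spaces (data : String) (out : List (String × String)) : Prop :=
  out = parse_msg_with_spaces_alt data
instance (data : String) (out : List (String × String)) : Decidable (Spec_parse_msg_with_spaces data out) := by
  unfold Spec_parse_msg_with_spaces; infer_instance

-- ===== CLAIM (what is proved, stated in full; the proofs are below) =====
def Claim_equal_parse_msg_with_spaces : Prop := ∀ (data : String), Dom_parse_msg_with_spaces data → Pre_parse_msg_with_spaces data → Spec_parse_msg_with_spaces data (parse_msg_with_spaces data)

-- ===== LEMMAS AND PROOFS =====

lemma cg_shift (sub : List Char) : ∀ (f : Nat) (l : List Char) (a : Nat),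
    PySem.Chars.count.go sub f l a = a + PySem.Chars.count.go sub f l 0 := by
  intro f
  induction f with
  | zero => intro l a; simp [PySem.Chars.count.go]
  | succ f ih =>
    intro l a
    cases l with
    | nil => simp [PySem.Chars.count.go]
    | cons c rest =>
      simp only [PySem.Chars.count.go]
      split_ifs with h
      · rw [ih _ (a + 1), ih _ (0 + 1)]; omega
      · exact ih rest a

lemma cg_fuel (sub : List Char) (hs : sub ≠ []) : ∀ (f : Nat) (l : List Char) (a : Nat),
    l.length ≤ f → PySem.Chars.count.go sub f l a = PySem.Chars.count.go sub (f + 1) l a := by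
  intro f
  induction f with
  | zero =>
    intro l a h
    have : l = [] := List.eq_nil_of_length_eq_zero (Nat.le_zero.mp h)
    subst this; simp [PySem.Chars.count.go]
  | succ f ih =>
    intro l a h
    cases l with
    | nil => simp [PySem.Chars.count.go]
    | cons c rest =>
      simp only [PySem.Chars.count.go]
      split_ifs with hp
      · apply ih
        have hlen : 1 ≤ sub.length := by
          cases sub with
          | nil => exact absurd rfl hs
          | cons a b => simp
        simp only [List.length_drop]
        simp at h ⊢; omega
      · apply ih; simpa using Nat.le_of_succ_le_succ h

lemma sg_len (sep : List Char) : ∀ (f : Nat) (l cur : List Char) (acc : List (List Char)),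
    (PySem.Chars.splitOn.go sep f l cur acc).length = acc.length + 1 + PySem.Chars.count.go sep f l 0 := by
  intro f
  induction f with
  | zero => intro l cur acc; simp [PySem.Chars.splitOn.go, PySem.Chars.count.go]
  | succ f ih =>
    intro l cur acc
    cases l with
    | nil => simp [PySem.Chars.splitOn.go, PySem.Chars.count.go]
    | cons c rest =>
      simp only [PySem.Chars.splitOn.go, PySem.Chars.count.go]
      split_ifs with h
      · rw [ih, cg_shift sep f _ 1]; simp; omega
      · rw [ih]

-- len(t.split("=")) = t.count("=") + 1 — ties A's branch test to B's
lemma split_len (t : String) :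
    ((PySem.Str.split? t "=").getD []).length = PySem.Str.count t "=" + 1 := by
  have hsep : (("=" : String).toList) = ['='] := by decide
  simp only [PySem.Str.split?, PySem.Str.count, PySem.Chars.split?, hsep]
  simp only [List.isEmpty_cons, if_false, Option.map_some, Option.getD_some, List.length_map,
    Bool.false_eq_true]
  simp only [PySem.Chars.splitOn, PySem.Chars.count, List.isEmpty_cons, Bool.false_eq_true,
    if_false]
  rw [sg_len, ← cg_fuel ['='] (by simp) t.toList.length t.toList 0 le_rfl]
  simp only [List.length_nil]
  omega

lemma join_singleton_str (v : String) : PySem.Str.join " " [v] = v := by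
  rw [← String.toList_inj, PySem.Str.toList_join]
  simp [PySem.Chars.join_singleton]

lemma join_cons_cons_str (a b : String) (l : List String) :
    PySem.Str.join " " (a :: b :: l) = a ++ " " ++ PySem.Str.join " " (b :: l) := by
  rw [← String.toList_inj]
  simp only [PySem.Str.toList_join, String.toList_append, List.map_cons,
    PySem.Chars.join_cons_cons]

lemma join_shift (v p : String) (ps : List String) :
    PySem.Str.join " " ((v ++ " " ++ p) :: ps) = v ++ " " ++ PySem.Str.join " " (p :: ps) := by
  cases ps with
  | nil => rw [join_singleton_str, join_singleton_str]
  | cons q qs =>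
    rw [join_cons_cons_str, join_cons_cons_str, ← String.toList_inj]
    simp only [String.toList_append, List.append_assoc]

-- the heart: A's fold carrying an open (key, value-so-far) pair equals B's grouped processing
lemma pv_main (ts : List String) : ∀ (fields : PySem.Dict String String) (k v : String),
    (match (ts.foldl pvA_step (fields, some (k, v))).2 with
     | some (p, q) => PySem.Dict.insert (ts.foldl pvA_step (fields, some (k, v))).1 p q
     | none => (ts.foldl pvA_step (fields, some (k, v))).1)
    = pvB_main (pvB_cont ts).2
        (PySem.Dict.insert fields k (PySem.Str.join " " (v :: (pvB_cont ts).1))) := by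
  induction ts with
  | nil => intro fields k v; simp [pvB_cont, pvB_main, join_singleton_str]
  | cons t ts ih =>
    intro fields k v
    by_cases hl : ((PySem.Str.split? t "=").getD []).length = 2
    · obtain ⟨a, b, hab⟩ := List.length_eq_two.mp hl
      have hcC : PySem.Chars.count t.toList ['='] = 1 := by
        have := split_len t; rw [hl] at this
        simpa [PySem.Str.count] using this.symm
      rw [List.foldl_cons]
      have hstep : pvA_step (fields, some (k, v)) t =
          (PySem.Dict.insert fields k v, some (a, b)) := by
        simp [pvA_step, hab]
      rw [hstep, ih]
      conv_rhs => rw [show pvB_cont (t :: ts) = ([], t :: ts) by simp [pvB_cont, hcC]]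
      simp only [pvB_main, hab, join_singleton_str]
    · have hcC : ¬ PySem.Chars.count t.toList ['='] = 1 := by
        have h1 := split_len t
        intro h2
        exact hl (by simpa [PySem.Str.count, h2] using h1)
      rw [List.foldl_cons]
      have hstep : pvA_step (fields, some (k, v)) t =
          (fields, some (k, v ++ " " ++ ((PySem.Str.split? t "=").getD []).headD "")) := by
        simp [pvA_step, hl]
      rw [hstep, ih]
      conv_rhs => rw [show pvB_cont (t :: ts) =
        (((PySem.Str.split? t "=").getD []).headD "" :: (pvB_cont ts).1, (pvB_cont ts).2) by
          simp [pvB_cont, hcC]]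
      rw [join_cons_cons_str, ← join_shift]

-- ===== VERDICT (by name: the statement is the Claim_ definition above) =====
theorem parse_msg_with_spaces_spec : Claim_equal_parse_msg_with_spaces := by
  intro data _ hpre
  unfold Spec_parse_msg_with_spaces parse_msg_with_spaces parse_msg_with_spaces_alt
  cases hts : PySem.Str.split₀ data with
  | nil => simp [pvB_main]
  | cons t ts =>
    rcases hpre with h | hc
    · rw [hts] at h; exact absurd h (by simp)
    · rw [hts] at hc
      simp only [List.headD_cons] at hc
      have hl : ((PySem.Str.split? t "=").getD []).length = 2 := by
        have := split_len t; omega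
      obtain ⟨a, b, hab⟩ := List.length_eq_two.mp hl
      simp only [List.foldl_cons]
      have hstep : pvA_step (PySem.Dict.empty, none) t = (PySem.Dict.empty, some (a, b)) := by
        simp [pvA_step, hab]
      rw [hstep]
      have := congrArg PySem.Dict.items (pv_main ts PySem.Dict.empty a b)
      refine this.trans ?_
      simp only [pvB_main, hab]
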